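-- pv_equiv track=rewrite | github.com/cheoljin408/baekjoon-algorithm | programmers/level2/다리를지나는트럭.py | solution
-- ===== SOURCE A (Python) =====
-- def solution(bridge_length, weight, truck_weights):
--     answer = 0
--     cnt = 0
--
--     bridge = []
--     for _ in range(bridge_length):
--         bridge.append(0)
--
--     while truck_weights:
--         bridge.pop(0)
--         if truck_weights[0] + sum(bridge) <= weight:
--             bridge.append(truck_weights.pop(0))
--         else:
--             bridge.append(0)
--         cnt += 1
--
--     while bridge:
--         cnt += 1
--         bridge.pop()
--     answer = cnt
--     return answer
-- ===== SOURCE B (Python) =====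
-- def solution(bridge_length, weight, truck_weights):
--     # Event-driven: compute each truck's entry step directly, jumping from exit
--     # event to exit event instead of simulating every time step.  queue keeps
--     # (entry_step, weight) of trucks on the bridge, head marks the oldest one
--     # still on it, load is their total weight.  Return value only: A pops from
--     # the caller's truck_weights list, B leaves its arguments untouched.
--     if not truck_weights:
--         return max(bridge_length, 0)  # no trucks: only the (possibly empty) bridge drains
--     queue = []
--     head = 0
--     load = 0
--     t = 0  # entry step (1-based) of the last truck that entered
--     for w in truck_weights:
--         t += 1
--         # trucks that have left the bridge by step t
--         while head < len(queue) and queue[head][0] + bridge_length <= t: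
--             load -= queue[head][1]
--             head += 1
--         # too heavy: jump straight to the exit step of the oldest truck, repeat
--         while load + w > weight:
--             entry, wt = queue[head]
--             load -= wt
--             head += 1
--             t = entry + bridge_length
--         queue.append((t, w))
--         load += w
--     return t + bridge_length
-- ===== Notes on version B (the rewrite author's own statement) =====
-- stated objective: faster
-- what changed: B replaces A's step-by-step simulation (one iteration per time unit, each with an O(L) sum() over the bridge and O(L) list pops) by an event-driven computation of each truck's entry step: it keeps the trucks on the bridge as (entry_step, weight) pairs with a running load and, when the next truck is too heavy, jumps time straight to the exit step of the oldest truck instead of ticking through idle steps; the final drain loop becomes '+ bridge_length'; B does not mutate the caller's truck_weights list, while A pops from it (return value unchanged).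
import Mathlib
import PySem

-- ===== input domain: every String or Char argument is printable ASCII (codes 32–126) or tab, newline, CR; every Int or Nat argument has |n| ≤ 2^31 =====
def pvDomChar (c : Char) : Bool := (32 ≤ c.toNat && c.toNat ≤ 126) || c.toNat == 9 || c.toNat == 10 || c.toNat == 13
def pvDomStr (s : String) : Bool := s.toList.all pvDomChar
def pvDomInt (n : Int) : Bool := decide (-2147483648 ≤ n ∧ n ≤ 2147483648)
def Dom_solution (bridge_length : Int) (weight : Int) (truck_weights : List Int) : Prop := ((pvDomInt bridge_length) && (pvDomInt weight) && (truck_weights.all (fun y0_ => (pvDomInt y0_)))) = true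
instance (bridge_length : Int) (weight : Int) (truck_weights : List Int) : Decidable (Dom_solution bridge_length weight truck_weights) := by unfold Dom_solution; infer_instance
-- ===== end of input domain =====

-- B replaces A's per-time-step simulation by an event-driven computation of each
-- truck's entry step (jumping from exit event to exit event with a running load);
-- the drain loop becomes '+ bridge_length'.  Equivalence is about the RETURN value
-- only: A pops from the caller's truck_weights list, B does not mutate its arguments.
-- (The final drain '+ bridge_length' on an empty truck list is max(bridge_length, 0).)

-- ===== PORT A =====
-- 'while bridge: cnt += 1; bridge.pop()' — pops from the back
def pvDrainA : List Int → Int → Int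
  | [], cnt => cnt
  | b :: bs, cnt => pvDrainA (b :: bs).dropLast (cnt + 1)
termination_by l _ => l.length
decreasing_by simp

-- 'while truck_weights: …' — may loop forever in Python, so fueled; none = fuel ran out
-- (the [] bridge case is Python's IndexError from bridge.pop(0), also outside Pre_)
def pvLoopA (weight : Int) : Nat → List Int → List Int → Int → Option Int
  | 0, _, _, _ => none
  | fuel + 1, bridge, trucks, cnt =>
    match trucks with
    | [] => some (pvDrainA bridge cnt)
    | t0 :: rest =>
      match bridge with
      | [] => none
      | _ :: bs =>
        if t0 + bs.sum ≤ weight then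
          pvLoopA weight fuel (bs ++ [t0]) rest (cnt + 1)
        else
          pvLoopA weight fuel (bs ++ [0]) (t0 :: rest) (cnt + 1)

def solution (bridge_length : Int) (weight : Int) (truck_weights : List Int) : Int :=
  match pvLoopA weight ((truck_weights.length + 1) * (bridge_length.toNat + 1) + 1)
      (List.replicate bridge_length.toNat 0) truck_weights 0 with
  | some c => c
  | none => 0

-- ===== PORT B =====
-- first inner while: drop from queue[head:] the trucks that left the bridge by step t
def bSkip (bl t : Int) (q : List (Int × Int)) : Nat → Int → Nat × Int
  | head, load =>
    if h : head < q.length then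
      if (q[head]).1 + bl ≤ t then bSkip bl t q (head + 1) (load - (q[head]).2)
      else (head, load)
    else (head, load)
termination_by head _ => q.length - head
decreasing_by omega

-- second inner while: while too heavy, pop the oldest truck and jump t to its exit step
-- (the head-out-of-range case is Python's IndexError on queue[head]; outside Pre_)
def bWait (bl weight w : Int) (q : List (Int × Int)) : Nat → Int → Int → Nat × Int × Int
  | head, load, t =>
    if weight < load + w then
      if h : head < q.length then
        bWait bl weight w q (head + 1) (load - (q[head]).2) ((q[head]).1 + bl)
      else (head, load, t)
    else (head, load, t)
termination_by head _ _ => q.length - head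
decreasing_by omega

-- the 'for w in truck_weights' loop; returns the final t
def bMain (bl weight : Int) : List Int → List (Int × Int) → Nat → Int → Int → Int
  | [], _, _, _, t => t
  | w :: rest, q, head, load, t =>
    match bSkip bl (t + 1) q head load with
    | (h1, l1) =>
      match bWait bl weight w q h1 l1 (t + 1) with
      | (h2, l2, t2) => bMain bl weight rest (q ++ [(t2, w)]) h2 (l2 + w) t2

def solution_alt (bridge_length : Int) (weight : Int) (truck_weights : List Int) : Int :=
  -- 'if not truck_weights: return max(bridge_length, 0)' — no trucks, only the bridge drains
  if truck_weights = [] then max bridge_length 0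
  else bMain bridge_length weight truck_weights [] 0 0 0 + bridge_length

-- ===== PRECONDITION & SPEC =====
-- Pre_ asks: bridge_length ≥ 1 when trucks are waiting (with bridge_length ≤ 0 and a
-- nonempty truck list A raises IndexError on bridge.pop(0)), and every truck weight
-- ≤ weight (otherwise A's first while loop never returns: once the bridge has drained
-- the overweight truck can never enter).  Every excluded input makes A raise or diverge.
def Pre_solution (bridge_length : Int) (weight : Int) (truck_weights : List Int) : Prop :=
  (truck_weights ≠ [] → 1 ≤ bridge_length) ∧ ∀ x ∈ truck_weights, x ≤ weight
instance (bridge_length : Int) (weight : Int) (truck_weights : List Int) : Decidable (Pre_solution bridge_length weight truck_weights) := by unfold Pre_solution; infer_instance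

def pvWitness_solution : Int × Int × List Int := (2, 10, [7, 4, 5, 6])

def Spec_solution (bridge_length : Int) (weight : Int) (truck_weights : List Int) (out : Int) : Prop := out = solution_alt bridge_length weight truck_weights
instance (bridge_length : Int) (weight : Int) (truck_weights : List Int) (out : Int) : Decidable (Spec_solution bridge_length weight truck_weights out) := by unfold Spec_solution; infer_instance

-- ===== CLAIM (what is proved, stated in full; the proofs are below) =====
def Claim_equal_solution : Prop := ∀ (bridge_length : Int) (weight : Int) (truck_weights : List Int), Dom_solution bridge_length weight truck_weights → Pre_solution bridge_length weight truck_weights → Spec_solution bridge_length weight truck_weights (solution bridge_length weight truck_weights)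

-- ===== LEMMAS AND PROOFS =====

-- ---- ghost abstractions ----
-- weight that entered at step s (0 if none); q holds (entry_step, weight) pairs
def pvWAt (q : List (Int × Int)) (s : Int) : Int :=
  match q.find? (fun p => p.1 == s) with
  | some p => p.2
  | none => 0

-- A's bridge after t steps: slot k holds the weight that entered at step t+1+k-L
def pvWin (L : Nat) (q : List (Int × Int)) (t : Int) : List Int :=
  (List.range L).map (fun k : Nat => pvWAt q (t + 1 + (k : Int) - (L : Int)))

-- total weight of trucks still on the bridge at step t
def pvActive (bl : Int) (q : List (Int × Int)) (t : Int) : Int :=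
  (q.map (fun p => if t < p.1 + bl then p.2 else 0)).sum

def pvSuffix (q : List (Int × Int)) (h : Nat) : Int := ((q.drop h).map Prod.snd).sum

-- head h splits q into the trucks gone by step t and those still on the bridge
def pvBnd (bl : Int) (q : List (Int × Int)) (h : Nat) (t : Int) : Prop :=
  h ≤ q.length ∧ ∀ j (hj : j < q.length),
    (j < h → (q[j]).1 + bl ≤ t) ∧ (h ≤ j → t < (q[j]).1 + bl)

def pvSorted (q : List (Int × Int)) : Prop := List.Pairwise (fun a b => a.1 < b.1) q

-- A's drain loop counts the bridge's length
lemma pvDrainA_eq (l : List Int) (cnt : Int) : pvDrainA l cnt = cnt + l.length := by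
  induction l, cnt using pvDrainA.induct with
  | case1 cnt => simp [pvDrainA]
  | case2 b bs cnt ih =>
    rw [pvDrainA, ih]
    simp [List.length_dropLast]
    omega

lemma pvFind_none (q : List (Int × Int)) (t s : Int) (hq : ∀ p ∈ q, p.1 ≤ t) (hs : t < s) :
    q.find? (fun p => p.1 == s) = none := by
  rw [List.find?_eq_none]
  intro p hp
  have := hq p hp
  simp only [beq_iff_eq]
  omega

lemma pvWAt_none (q : List (Int × Int)) (t s : Int) (hq : ∀ p ∈ q, p.1 ≤ t) (hs : t < s) :
    pvWAt q s = 0 := by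
  rw [pvWAt, pvFind_none q t s hq hs]

lemma pvWAt_cons (e w : Int) (q : List (Int × Int)) (s : Int) :
    pvWAt ((e, w) :: q) s = if e = s then w else pvWAt q s := by
  by_cases h : e = s
  · simp [pvWAt, h]
  · simp only [pvWAt, List.find?_cons]
    have : ((e, w).1 == s) = false := by simpa using h
    rw [this, if_neg h]

lemma pvWAt_append (q : List (Int × Int)) (p : Int × Int) (s : Int)
    (hne : p.1 ≠ s) : pvWAt (q ++ [p]) s = pvWAt q s := by
  simp only [pvWAt, List.find?_append]
  cases h : q.find? (fun p => p.1 == s) with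
  | some a => rfl
  | none =>
    have : List.find? (fun p => p.1 == s) [p] = none := by
      simp [hne]
    simp [this]

lemma pvWAt_append_self (q : List (Int × Int)) (t : Int) (w : Int)
    (hq : ∀ p ∈ q, p.1 ≤ t) : pvWAt (q ++ [(t + 1, w)]) (t + 1) = w := by
  simp only [pvWAt, List.find?_append, pvFind_none q t (t + 1) hq (by omega)]
  simp

-- peel the front slot of the window
lemma pvWin_succ (L : Nat) (q : List (Int × Int)) (t : Int) :
    pvWin (L + 1) q t = pvWAt q (t - L) :: pvWin L q t := by
  rw [pvWin, List.range_succ_eq_map, List.map_cons, List.map_map]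
  refine congrArg₂ List.cons ?_ ?_
  · congr 1
    push_cast
    ring
  · rw [pvWin]
    refine List.map_congr_left ?_
    intro k hk
    simp only [Function.comp_apply]
    congr 1
    push_cast
    ring

-- shift: the window one step later is the old tail plus the step-(t+1) entry
lemma pvWin_shift (L : Nat) (q : List (Int × Int)) (t : Int) :
    pvWin (L + 1) q (t + 1) = pvWin L q t ++ [pvWAt q (t + 1)] := by
  rw [pvWin, List.range_succ, List.map_append, List.map_cons, List.map_nil]
  refine congrArg₂ List.append ?_ ?_
  · rw [pvWin]
    refine List.map_congr_left ?_
    intro k hk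
    congr 1
    push_cast
    ring
  · congr 2
    push_cast
    ring

lemma pvWin_append (L : Nat) (q : List (Int × Int)) (t : Int) (p : Int × Int)
    (hs0 : t < p.1) : pvWin L (q ++ [p]) t = pvWin L q t := by
  refine List.map_congr_left ?_
  intro k hk
  rw [List.mem_range] at hk
  refine pvWAt_append q p _ ?_
  have : (k : Int) + 1 ≤ (L : Int) := by exact_mod_cast hk
  omega

lemma pvWAt_zero_of_ne (q : List (Int × Int)) (s : Int) (hne : ∀ p ∈ q, p.1 ≠ s) :
    pvWAt q s = 0 := by
  have : q.find? (fun p => p.1 == s) = none := by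
    rw [List.find?_eq_none]
    intro p hp
    simpa using hne p hp
  rw [pvWAt, this]

lemma pvWin_sum_cons (L : Nat) (e w t : Int) (q : List (Int × Int))
    (he : e ≤ t) (hne : ∀ p ∈ q, p.1 ≠ e) :
    (pvWin L ((e, w) :: q) t).sum = (if t < e + L then w else 0) + (pvWin L q t).sum := by
  induction L with
  | zero =>
    simp only [pvWin, List.range_zero, List.map_nil, List.sum_nil, Nat.cast_zero]
    rw [if_neg (by omega)]
    omega
  | succ L ih =>
    rw [pvWin_succ, pvWin_succ, List.sum_cons, List.sum_cons, ih, pvWAt_cons]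
    by_cases hel : e = t - L
    · subst hel
      rw [if_pos rfl, pvWAt_zero_of_ne q (t - L) hne]
      rw [if_neg (show ¬ t < t - (L : Int) + (L : Int) by omega),
        if_pos (show t < t - (L : Int) + ((L + 1 : Nat) : Int) by push_cast; omega)]
    · rw [if_neg hel]
      have hif : (if t < e + ((L + 1 : Nat) : Int) then w else 0)
          = (if t < e + (L : Int) then w else 0) := by
        have hne' : e + (L : Int) ≠ t := by omega
        by_cases hc : t < e + (L : Int)
        · rw [if_pos (by push_cast; omega), if_pos hc]
        · rw [if_neg (by push_cast; omega), if_neg hc]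
      rw [hif]
      ring

-- window sum = weight still on the bridge
lemma pvWin_sum (L : Nat) (q : List (Int × Int)) (t : Int)
    (hs : pvSorted q) (hq : ∀ p ∈ q, p.1 ≤ t) :
    (pvWin L q t).sum = pvActive L q t := by
  induction q with
  | nil => simp [pvWin, pvWAt, pvActive]
  | cons p q ih =>
    obtain ⟨e, w⟩ := p
    rw [pvSorted, List.pairwise_cons] at hs
    have hne : ∀ p ∈ q, p.1 ≠ e := fun p hp => (ne_of_gt (hs.1 p hp))
    rw [pvWin_sum_cons L e w t q (hq (e, w) (by simp)) hne,
      ih hs.2 (fun p hp => hq p (by simp [hp]))]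
    simp [pvActive]

lemma pvActive_zero (bl : Int) (q : List (Int × Int)) (t0 s : Int)
    (hq : ∀ p ∈ q, p.1 ≤ t0) (hs : t0 + bl ≤ s) : pvActive bl q s = 0 := by
  refine List.sum_eq_zero ?_
  intro x hx
  rw [List.mem_map] at hx
  obtain ⟨p, hp, rfl⟩ := hx
  have := hq p hp
  rw [if_neg (by omega)]

lemma pvSuffix_succ (q : List (Int × Int)) (h : Nat) (hh : h < q.length) :
    pvSuffix q h = (q[h]).2 + pvSuffix q (h + 1) := by
  rw [pvSuffix, List.drop_eq_getElem_cons hh, List.map_cons, List.sum_cons, ← pvSuffix]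

lemma pvSuffix_append (q : List (Int × Int)) (p : Int × Int) (h : Nat) (hh : h ≤ q.length) :
    pvSuffix (q ++ [p]) h = pvSuffix q h + p.2 := by
  rw [pvSuffix, List.drop_append_of_le_length hh]
  simp [pvSuffix]

lemma pvActive_eq_suffix (bl : Int) (q : List (Int × Int)) (h : Nat) (t : Int)
    (hb : pvBnd bl q h t) : pvActive bl q t = pvSuffix q h := by
  induction q generalizing h with
  | nil => simp [pvActive, pvSuffix]
  | cons p q ih =>
    obtain ⟨hh, hj⟩ := hb
    simp only [List.length_cons] at hh
    cases h with
    | zero =>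
      have h0 : t < p.1 + bl := ((hj 0 (by simp)).2 (by omega))
      have hrest : pvBnd bl q 0 t := by
        refine ⟨by omega, ?_⟩
        intro j hjl
        have := hj (j + 1) (by simpa using Nat.succ_lt_succ hjl)
        simpa using this
      rw [pvActive, List.map_cons, List.sum_cons, if_pos h0, ← pvActive, ih 0 hrest]
      simp [pvSuffix]
    | succ h' =>
      have h0 : p.1 + bl ≤ t := ((hj 0 (by simp)).1 (by omega))
      have hrest : pvBnd bl q h' t := by
        refine ⟨by omega, ?_⟩
        intro j hjl
        have := hj (j + 1) (by simpa using Nat.succ_lt_succ hjl)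
        simp only [List.getElem_cons_succ] at this
        exact ⟨fun hlt => this.1 (by omega), fun hge => this.2 (by omega)⟩
      rw [pvActive, List.map_cons, List.sum_cons, if_neg (by omega), ← pvActive, ih h' hrest]
      simp [pvSuffix]

-- ---- B-side loop specifications ----
lemma pvSorted_getElem (q : List (Int × Int)) (hs : pvSorted q) (i j : Nat)
    (hij : i < j) (hj : j < q.length) : (q[i]'(by omega)).1 < (q[j]).1 :=
  List.pairwise_iff_getElem.mp hs i j (by omega) hj hij

lemma bSkip_spec (bl t' : Int) (q : List (Int × Int)) (hs : pvSorted q) :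
    ∀ (h : Nat) (load : Int) (h1 : Nat) (l1 : Int),
    bSkip bl t' q h load = (h1, l1) → h ≤ q.length →
    (∀ j (hj : j < q.length), j < h → (q[j]).1 + bl ≤ t') → load = pvSuffix q h →
    pvBnd bl q h1 t' ∧ l1 = pvSuffix q h1 := by
  intro h load
  induction h, load using bSkip.induct (bl := bl) (t := t') (q := q) with
  | case1 head load hlt hcond ih =>
    intro h1 l1 heq hh hpre hload
    rw [bSkip, dif_pos hlt, if_pos hcond] at heq
    refine ih h1 l1 heq (by omega) ?_ ?_
    · intro j hj hjlt
      by_cases hcase : j < head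
      · exact hpre j hj hcase
      · have : j = head := by omega
        subst this
        exact hcond
    · rw [hload, pvSuffix_succ q head hlt]
      ring
  | case2 head load hlt hcond =>
    intro h1 l1 heq hh hpre hload
    rw [bSkip, dif_pos hlt, if_neg hcond] at heq
    obtain ⟨rfl, rfl⟩ : head = h1 ∧ load = l1 := by
      constructor <;> [exact congrArg Prod.fst heq; exact congrArg Prod.snd heq]
    refine ⟨⟨by omega, ?_⟩, hload⟩
    intro j hj
    refine ⟨fun hjlt => hpre j hj hjlt, fun hge => ?_⟩
    by_cases hcase : j = head
    · subst hcase
      omega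
    · have hlt2 : (q[head]).1 < (q[j]).1 := pvSorted_getElem q hs head j (by omega) hj
      omega
  | case3 head load hge =>
    intro h1 l1 heq hh hpre hload
    rw [bSkip, dif_neg hge] at heq
    obtain ⟨rfl, rfl⟩ : head = h1 ∧ load = l1 := by
      constructor <;> [exact congrArg Prod.fst heq; exact congrArg Prod.snd heq]
    have : head = q.length := by omega
    subst this
    exact ⟨⟨le_refl _, fun j hj => ⟨fun hjlt => hpre j hj hjlt, fun hge2 => by omega⟩⟩, hload⟩

lemma bWait_spec (bl W w : Int) (q : List (Int × Int)) (hs : pvSorted q) (hw : w ≤ W) :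
    ∀ (h : Nat) (load t : Int) (h2 : Nat) (l2 t2 : Int),
    bWait bl W w q h load t = (h2, l2, t2) → pvBnd bl q h t →
    load = pvSuffix q h →
    pvBnd bl q h2 t2 ∧ l2 = pvSuffix q h2 ∧ t ≤ t2 ∧ w + pvActive bl q t2 ≤ W ∧
      ∀ s, t ≤ s → s < t2 → ¬ (w + pvActive bl q s ≤ W) := by
  intro h load t
  induction h, load, t using bWait.induct (bl := bl) (weight := W) (w := w) (q := q) with
  | case1 head load t hheavy hlt ih =>
    intro h2 l2 t2 heq hb hload
    rw [bWait, if_pos hheavy, dif_pos hlt] at heq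
    -- the popped truck is still on the bridge at t, so t < its exit step
    have hexit : t < (q[head]).1 + bl := (hb.2 head hlt).2 (le_refl _)
    have hb' : pvBnd bl q (head + 1) ((q[head]).1 + bl) := by
      refine ⟨by omega, ?_⟩
      intro j hj
      constructor
      · intro hjlt
        by_cases hcase : j = head
        · subst hcase; omega
        · have := (hb.2 j hj).1 (by omega)
          omega
      · intro hge
        have := pvSorted_getElem q hs head j (by omega) hj
        omega
    have hload' : load - (q[head]).2 = pvSuffix q (head + 1) := by
      rw [hload, pvSuffix_succ q head hlt]
      ring
    obtain ⟨rb, rl, rt, rc, rmin⟩ := ih h2 l2 t2 heq hb' hload'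
    refine ⟨rb, rl, by omega, rc, ?_⟩
    intro s hts hst
    by_cases hcase : s < (q[head]).1 + bl
    · -- boundary at s is still head, so the load has not changed: still too heavy
      have hbs : pvBnd bl q head s := by
        refine ⟨by omega, ?_⟩
        intro j hj
        constructor
        · intro hjlt
          have := (hb.2 j hj).1 hjlt
          omega
        · intro hge
          by_cases hj0 : j = head
          · subst hj0; omega
          · have := pvSorted_getElem q hs head j (by omega) hj
            omega
      rw [pvActive_eq_suffix bl q head s hbs, ← hload]
      omega
    · exact rmin s (by omega) hst
  | case2 head load t hheavy hge =>
    -- Python's IndexError: impossible, since the empty-bridge load 0 admits any w ≤ W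
    intro h2 l2 t2 heq hb hload
    exfalso
    have : head = q.length := by have := hb.1; omega
    subst this
    rw [hload, pvSuffix, List.drop_length] at hheavy
    simp at hheavy
    omega
  | case3 head load t hlight =>
    intro h2 l2 t2 heq hb hload
    rw [bWait, if_neg hlight] at heq
    obtain ⟨rfl, rfl, rfl⟩ : head = h2 ∧ load = l2 ∧ t = t2 := by
      refine ⟨congrArg Prod.fst heq, ?_, ?_⟩
      · have := congrArg Prod.snd heq; exact congrArg Prod.fst this
      · have := congrArg Prod.snd heq; exact congrArg Prod.snd this
    refine ⟨hb, hload, le_refl _, ?_, ?_⟩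
    · rw [pvActive_eq_suffix bl q _ _ hb, ← hload]
      omega
    · intro s h1 h2'
      omega

-- ---- A-side step lemmas ----
lemma stepIdle (W w : Int) (L : Nat) (hL : 1 ≤ L) (q : List (Int × Int)) (t : Int)
    (fuel : Nat) (r : List Int) (hq : ∀ p ∈ q, p.1 ≤ t) (hs : pvSorted q)
    (hc : ¬ (w + pvActive (L : Int) q (t + 1) ≤ W)) :
    pvLoopA W (fuel + 1) (pvWin L q t) (w :: r) t
      = pvLoopA W fuel (pvWin L q (t + 1)) (w :: r) (t + 1) := by
  obtain ⟨m, rfl⟩ : ∃ m, L = m + 1 := ⟨L - 1, by omega⟩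
  have hq1 : ∀ p ∈ q, p.1 ≤ t + 1 := fun p hp => by have := hq p hp; omega
  have hshift : pvWin (m + 1) q (t + 1) = pvWin m q t ++ [0] := by
    rw [pvWin_shift, pvWAt_none q t (t + 1) hq (by omega)]
  have hsum : (pvWin m q t).sum = pvActive ((m + 1 : Nat) : Int) q (t + 1) := by
    have h1 := pvWin_sum (m + 1) q (t + 1) hs hq1
    rw [hshift] at h1
    simpa using h1
  rw [pvWin_succ, pvLoopA]
  rw [hsum, if_neg hc, hshift]

lemma stepEnter (W w : Int) (L : Nat) (hL : 1 ≤ L) (q : List (Int × Int)) (t : Int)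
    (fuel : Nat) (r : List Int) (hq : ∀ p ∈ q, p.1 ≤ t) (hs : pvSorted q)
    (hc : w + pvActive (L : Int) q (t + 1) ≤ W) :
    pvLoopA W (fuel + 1) (pvWin L q t) (w :: r) t
      = pvLoopA W fuel (pvWin L (q ++ [(t + 1, w)]) (t + 1)) r (t + 1) := by
  obtain ⟨m, rfl⟩ : ∃ m, L = m + 1 := ⟨L - 1, by omega⟩
  have hq1 : ∀ p ∈ q, p.1 ≤ t + 1 := fun p hp => by have := hq p hp; omega
  have hshift : pvWin (m + 1) q (t + 1) = pvWin m q t ++ [0] := by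
    rw [pvWin_shift, pvWAt_none q t (t + 1) hq (by omega)]
  have hsum : (pvWin m q t).sum = pvActive ((m + 1 : Nat) : Int) q (t + 1) := by
    have h1 := pvWin_sum (m + 1) q (t + 1) hs hq1
    rw [hshift] at h1
    simpa using h1
  have hwin' : pvWin (m + 1) (q ++ [(t + 1, w)]) (t + 1) = pvWin m q t ++ [w] := by
    rw [pvWin_shift, pvWin_append m q t ((t + 1, w)) (by simp), pvWAt_append_self q t w hq]
  rw [pvWin_succ, pvLoopA]
  rw [hsum, if_pos hc, hwin']

lemma idleChain (W w : Int) (L : Nat) (hL : 1 ≤ L) (q : List (Int × Int)) (r : List Int)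
    (hs : pvSorted q) :
    ∀ (d : Nat) (t : Int) (fuel : Nat), (∀ p ∈ q, p.1 ≤ t) →
    (∀ s, t < s → s ≤ t + (d : Int) → ¬ (w + pvActive (L : Int) q s ≤ W)) →
    pvLoopA W (d + fuel) (pvWin L q t) (w :: r) t
      = pvLoopA W fuel (pvWin L q (t + (d : Int))) (w :: r) (t + (d : Int)) := by
  intro d
  induction d with
  | zero =>
    intro t fuel _ _
    simp
  | succ d ih =>
    intro t fuel hq hbound
    have hq1 : ∀ p ∈ q, p.1 ≤ t + 1 := fun p hp => by have := hq p hp; omega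
    calc pvLoopA W (d + 1 + fuel) (pvWin L q t) (w :: r) t
        = pvLoopA W ((d + fuel) + 1) (pvWin L q t) (w :: r) t := by
          rw [show d + 1 + fuel = (d + fuel) + 1 from by omega]
      _ = pvLoopA W (d + fuel) (pvWin L q (t + 1)) (w :: r) (t + 1) :=
          stepIdle W w L hL q t (d + fuel) r hq hs
            (hbound (t + 1) (by omega) (by push_cast; omega))
      _ = pvLoopA W fuel (pvWin L q (t + 1 + (d : Int))) (w :: r) (t + 1 + (d : Int)) :=
          ih (t + 1) fuel hq1
            (fun s hs1 hs2 => hbound s (by omega) (by push_cast at hs2 ⊢; omega))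
      _ = pvLoopA W fuel (pvWin L q (t + ((d + 1 : Nat) : Int))) (w :: r)
            (t + ((d + 1 : Nat) : Int)) := by
          rw [show t + 1 + (d : Int) = t + ((d + 1 : Nat) : Int) from by push_cast; ring]

-- ---- the bisimulation ----
lemma mainSim (W : Int) (L : Nat) (hL : 1 ≤ L) :
    ∀ (trucks : List Int) (q : List (Int × Int)) (h : Nat) (load t : Int) (fuel : Nat),
    pvSorted q → (∀ p ∈ q, p.1 ≤ t) → pvBnd L q h t → load = pvSuffix q h →
    (∀ x ∈ trucks, x ≤ W) → trucks.length * L + 1 ≤ fuel →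
    pvLoopA W fuel (pvWin L q t) trucks t
      = some (bMain (L : Int) W trucks q h load t + L) := by
  intro trucks
  induction trucks with
  | nil =>
    intro q h load t fuel hs hq hb hload hall hfuel
    obtain ⟨f, rfl⟩ : ∃ f, fuel = f + 1 := ⟨fuel - 1, by omega⟩
    rw [pvLoopA, pvDrainA_eq, bMain]
    congr 2
    simp [pvWin]
  | cons w r ih =>
    intro q h load t fuel hs hq hb hload hall hfuel
    rcases hsk : bSkip (L : Int) (t + 1) q h load with ⟨h1, l1⟩
    have hskip := bSkip_spec (L : Int) (t + 1) q hs h load h1 l1 hsk hb.1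
      (fun j hj hjlt => by have := (hb.2 j hj).1 hjlt; omega) hload
    rcases hwt : bWait (L : Int) W w q h1 l1 (t + 1) with ⟨h2, l2, t2⟩
    have hwall : w ≤ W := hall w (by simp)
    obtain ⟨hb2, hl2, ht12, hcond2, hmin⟩ :=
      bWait_spec (L : Int) W w q hs hwall h1 l1 (t + 1) h2 l2 t2 hwt hskip.1 hskip.2
    have ht2le : t2 ≤ t + (L : Int) := by
      by_contra hlt
      push Not at hlt
      have h0 : pvActive (L : Int) q (t + (L : Int)) = 0 :=
        pvActive_zero (L : Int) q t (t + (L : Int)) hq (by omega)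
      have := hmin (t + (L : Int)) (by omega) (by omega)
      rw [h0] at this
      omega
    set d : Nat := (t2 - (t + 1)).toNat with hd
    have htd : t2 = t + 1 + (d : Int) := by omega
    have hdL : d + 1 ≤ L := by omega
    obtain ⟨f2, hfe, hf2⟩ : ∃ f2, fuel = d + (f2 + 1) ∧ r.length * L + 1 ≤ f2 := by
      have hex : (r.length + 1) * L = r.length * L + L := by ring
      have hlen : (w :: r).length = r.length + 1 := rfl
      rw [hlen, hex] at hfuel
      exact ⟨fuel - d - 1, by omega, by omega⟩
    rw [hfe]
    rw [idleChain W w L hL q r hs d t (f2 + 1) hq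
      (fun s hs1 hs2 => hmin s (by omega) (by omega))]
    rw [stepEnter W w L hL q (t + (d : Int)) f2 r
      (fun p hp => by have := hq p hp; omega) hs
      (by rw [show t + (d : Int) + 1 = t2 from by omega]; exact hcond2)]
    rw [show t + (d : Int) + 1 = t2 from by omega]
    have hsort' : pvSorted (q ++ [(t2, w)]) := by
      rw [pvSorted, List.pairwise_append]
      refine ⟨hs, List.pairwise_singleton _ _, ?_⟩
      intro p hp p' hp'
      simp only [List.mem_singleton] at hp'
      subst hp'
      have := hq p hp
      simp only []
      omega
    have hq' : ∀ p ∈ q ++ [(t2, w)], p.1 ≤ t2 := by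
      intro p hp
      rcases List.mem_append.mp hp with hcase | hcase
      · have := hq p hcase; omega
      · simp only [List.mem_singleton] at hcase
        subst hcase
        simp
    have hb' : pvBnd (L : Int) (q ++ [(t2, w)]) h2 t2 := by
      obtain ⟨hh2, hj2⟩ := hb2
      refine ⟨by simp; omega, ?_⟩
      intro j hj
      rw [List.length_append, List.length_singleton] at hj
      by_cases hcase : j < q.length
      · have hold := hj2 j hcase
        rw [List.getElem_append_left hcase]
        exact hold
      · have hjq : j = q.length := by omega
        subst hjq
        rw [List.getElem_append_right (le_refl _)]
        simp only [Nat.sub_self, List.getElem_singleton]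
        exact ⟨fun hjlt => by omega, fun _ => by omega⟩
    have hsuf' : l2 + w = pvSuffix (q ++ [(t2, w)]) h2 := by
      rw [pvSuffix_append q (t2, w) h2 hb2.1, ← hl2]
    rw [ih (q ++ [(t2, w)]) h2 (l2 + w) t2 f2 hsort' hq' hb' hsuf'
      (fun x hx => hall x (by simp [hx])) hf2]
    simp only [bMain, hsk, hwt]

lemma pvWin_nil (L : Nat) (t : Int) : pvWin L [] t = List.replicate L 0 := by
  rw [pvWin]
  rw [List.eq_replicate_iff]
  constructor
  · simp
  · intro b hb
    rw [List.mem_map] at hb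
    obtain ⟨k, _, rfl⟩ := hb
    rfl

-- ===== VERDICT (by name: the statement is the Claim_ definition above) =====
theorem solution_spec : Claim_equal_solution := by
  intro bl W tw hdom hpre
  obtain ⟨himp, hall⟩ := hpre
  unfold Spec_solution solution solution_alt
  by_cases htw : tw = []
  · subst htw
    rw [show ((([] : List Int).length + 1) * (bl.toNat + 1) + 1) = bl.toNat + 1 + 1 from by simp]
    rw [pvLoopA, pvDrainA_eq, if_pos rfl]
    simp
  · have h1 : 1 ≤ bl := himp htw
    have hL : 1 ≤ bl.toNat := by omega
    have hcast : (bl.toNat : Int) = bl := by omega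
    have hfuel : tw.length * bl.toNat + 1 ≤ (tw.length + 1) * (bl.toNat + 1) + 1 := by
      have hex : (tw.length + 1) * (bl.toNat + 1)
          = tw.length * bl.toNat + tw.length + bl.toNat + 1 := by ring
      omega
    have hmain := mainSim W bl.toNat hL tw [] 0 0 0
      ((tw.length + 1) * (bl.toNat + 1) + 1)
      (by rw [pvSorted]; exact List.Pairwise.nil)
      (by intro p hp; simp at hp)
      (⟨by simp, by intro j hj; simp at hj⟩)
      (by rw [pvSuffix]; simp)
      hall hfuel
    rw [pvWin_nil, hcast] at hmain
    rw [if_neg htw, hmain]
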